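-- pv_equiv track=rewrite | github.com/dicksiano/lan-pong | Client/client.py | handle_msg_errors
-- ===== SOURCE A (Python) =====
-- def handle_msg_errors(msg):
--   """Handle msg errors, when two messages are received \
--   from server and read like one: [[3, 140], [797, 300],\
--   [215, 299], 0, 0][[3, 140], [797, 300], [216, 300], 0, 0] -> \
--   [[3, 140], [797, 300], [216, 300], 0, 0]"""
--   idx = len(msg) - 1
--   open_bracket_count = 0
--   while idx >= 0:
--     if msg[idx] == '[':
--       open_bracket_count += 1
--       if open_bracket_count == 4:
--         return msg[idx:]
--     idx -= 1
--   return msg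
-- ===== SOURCE B (Python) =====
-- def handle_msg_errors(msg):
--   """Extract the last bracket message: take the 4th '[' from the end."""
--   pos = [i for i, c in enumerate(msg) if c == '[']
--   if len(pos) >= 4:
--     return msg[pos[-4]:]
--   return msg
-- ===== Notes on version B (the rewrite author's own statement) =====
-- stated objective: alternative
-- what changed: Replaces the backward scan with a running bracket counter and early return by a single forward pass that builds the table of all '[' positions and slices at the 4th position from the end.
import Mathlib
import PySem

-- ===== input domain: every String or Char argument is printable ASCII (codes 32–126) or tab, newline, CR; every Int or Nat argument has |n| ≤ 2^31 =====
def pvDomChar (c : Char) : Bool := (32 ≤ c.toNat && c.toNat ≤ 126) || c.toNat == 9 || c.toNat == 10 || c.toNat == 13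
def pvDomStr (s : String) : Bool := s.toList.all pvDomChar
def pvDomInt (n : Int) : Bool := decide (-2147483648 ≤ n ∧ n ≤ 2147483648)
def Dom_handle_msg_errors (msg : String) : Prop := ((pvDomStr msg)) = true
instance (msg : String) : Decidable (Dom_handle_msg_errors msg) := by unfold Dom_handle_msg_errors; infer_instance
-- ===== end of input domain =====

-- B replaces A's backward scan with counter and early exit by a forward pass building
-- the table of all '[' positions, slicing at the 4th from the end (alternative decomposition).

-- ===== PORT A =====
-- backward while-loop of A: k = idx + 1 (k = 0 means idx < 0, fall through to 'return msg')
def pvAGo (cs : List Char) (k : Nat) (cnt : Nat) : List Char :=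
  match k with
  | 0 => cs
  | Nat.succ k' =>
    if PySem.List.pyGet? cs (k' : Int) = some '[' then
      if cnt + 1 = 4 then PySem.List.slice cs (some (k' : Int)) none
      else pvAGo cs k' (cnt + 1)
    else pvAGo cs k' cnt

def handle_msg_errors (msg : String) : String :=
  String.ofList (pvAGo msg.toList msg.toList.length 0)

-- ===== PORT B =====
-- the table of '[' positions: [i for i, c in enumerate(msg) if c == '[']
def pvPos (cs : List Char) : List Int :=
  (PySem.List.enumerate cs 0).filterMap (fun p => if p.2 = '[' then some p.1 else none)

def handle_msg_errors_alt (msg : String) : String :=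
  let cs := msg.toList
  let pos : List Int := pvPos cs
  if 4 ≤ pos.length then
    String.ofList (PySem.List.slice cs (some (PySem.List.pyGetD pos (-4) 0)) none)
  else msg

-- ===== PRECONDITION & SPEC =====
def Spec_handle_msg_errors (msg : String) (out : String) : Prop := out = handle_msg_errors_alt msg
instance (msg : String) (out : String) : Decidable (Spec_handle_msg_errors msg out) := by unfold Spec_handle_msg_errors; infer_instance

-- ===== CLAIM (what is proved, stated in full; the proofs are below) =====
def Claim_equal_handle_msg_errors : Prop := ∀ (msg : String), Dom_handle_msg_errors msg → Spec_handle_msg_errors msg (handle_msg_errors msg)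

-- ===== LEMMAS AND PROOFS =====

lemma pvPos_snoc (xs : List Char) (c : Char) :
    pvPos (xs ++ [c]) = pvPos xs ++ (if c = '[' then [((xs.length : Int))] else []) := by
  unfold pvPos
  rw [PySem.List.enumerate_append, List.filterMap_append]
  by_cases h : c = '[' <;> simp [h, PySem.List.enumerate]

lemma pvAGo_eq (cs : List Char) :
    ∀ (k : Nat) (cnt : Nat), k ≤ cs.length → cnt < 4 →
    pvAGo cs k cnt =
      (if 4 ≤ (pvPos (cs.take k)).length + cnt then
        PySem.List.slice cs (some ((pvPos (cs.take k)).getD ((pvPos (cs.take k)).length + cnt - 4) 0)) none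
      else cs) := by
  intro k
  induction k with
  | zero =>
    intro cnt _ hcnt
    unfold pvAGo
    rw [if_neg (by simp [pvPos]; omega)]
  | succ k' ih =>
    intro cnt hk hcnt
    have hk' : k' < cs.length := by omega
    have htake : cs.take (k' + 1) = cs.take k' ++ [cs[k']] := by
      rw [List.take_add_one]
      simp [List.getElem?_eq_getElem hk']
    have hget : PySem.List.pyGet? cs (k' : Int) = some cs[k'] :=
      PySem.List.pyGet?_ofNat cs k' hk'
    have hlen : (cs.take k').length = k' := by simp; omega
    unfold pvAGo
    rw [hget, htake, pvPos_snoc, hlen]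
    by_cases hc : cs[k'] = '['
    · rw [if_pos (by rw [hc]), if_pos hc]
      by_cases h4 : cnt + 1 = 4
      · have hcnt3 : cnt = 3 := by omega
        subst hcnt3
        rw [if_pos h4]
        rw [if_pos (by simp)]
        have hgd : (pvPos (cs.take k') ++ [((k' : Nat) : Int)]).getD
            ((pvPos (cs.take k') ++ [((k' : Nat) : Int)]).length + 3 - 4) 0 = ((k' : Nat) : Int) := by
          have hidx : (pvPos (cs.take k') ++ [((k' : Nat) : Int)]).length + 3 - 4
              = (pvPos (cs.take k')).length := by simp
          rw [hidx, List.getD_append_right _ _ _ _ (le_refl _)]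
          simp
        rw [hgd]
      · rw [if_neg h4, ih (cnt + 1) (by omega) (by omega)]
        have hlen2 : (pvPos (cs.take k') ++ [((k' : Nat) : Int)]).length
            = (pvPos (cs.take k')).length + 1 := by simp
        rw [hlen2]
        by_cases hc4 : 4 ≤ (pvPos (cs.take k')).length + (cnt + 1)
        · rw [if_pos hc4, if_pos (by omega)]
          have hlt : (pvPos (cs.take k')).length + 1 + cnt - 4 < (pvPos (cs.take k')).length := by
            omega
          have heq : (pvPos (cs.take k')).length + (cnt + 1) - 4
              = (pvPos (cs.take k')).length + 1 + cnt - 4 := by omega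
          rw [heq, List.getD_append _ _ _ _ hlt]
        · rw [if_neg hc4, if_neg (by omega)]
    · rw [if_neg (by simp [hc]), if_neg hc, List.append_nil]
      exact ih cnt (by omega) hcnt

theorem handle_msg_errors_main (msg : String) :
    handle_msg_errors msg = handle_msg_errors_alt msg := by
  simp only [handle_msg_errors, handle_msg_errors_alt]
  rw [pvAGo_eq msg.toList msg.toList.length 0 (le_refl _) (by omega), List.take_length]
  by_cases h4 : 4 ≤ (pvPos msg.toList).length
  · rw [if_pos (show 4 ≤ (pvPos msg.toList).length + 0 from by omega), if_pos h4]
    rw [PySem.List.pyGetD_neg_ofNat (pvPos msg.toList) 4 0 (by omega) h4]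
    rw [List.getD_eq_getElem _ _ (by omega)]
    congr 3
  · rw [if_neg (show ¬ 4 ≤ (pvPos msg.toList).length + 0 from by omega), if_neg h4,
      String.ofList_toList]

-- ===== VERDICT (by name: the statement is the Claim_ definition above) =====
theorem handle_msg_errors_spec : Claim_equal_handle_msg_errors := by
  intro msg _
  exact handle_msg_errors_main msg
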